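-- pv_equiv track=rewrite | github.com/pavi2410/advent-of-code | 2015-python/day08/main.py | part2
-- ===== SOURCE A (Python) =====
-- def part2(_input: str) -> int:
--     s = 0
--     for line in _input.splitlines():
--         if not line or not line.startswith('"'):
--             pass
--
--         k = 2
--         k += line.count('\\')
--         k += line.count('"')
--
--         s += k
--     return s
-- ===== SOURCE B (Python) =====
-- def part2(_input: str) -> int:
--     # One pass over the characters: a state machine that adds 2 at each line
--     # break ("\r\n" counting as one) and once more for a final unterminated
--     # line, while tallying backslashes and quotes on the fly.
--     # (Within the printable-ASCII+tab/CR/LF domain, '\n' and '\r' are the only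
--     # line-break characters, matching splitlines.)
--     total = 0
--     extras = 0
--     in_line = False
--     i = 0
--     n = len(_input)
--     while i < n:
--         c = _input[i]
--         if c == '\n':
--             total += 2
--             in_line = False
--             i += 1
--         elif c == '\r':
--             total += 2
--             in_line = False
--             i += 2 if i + 1 < n and _input[i + 1] == '\n' else 1
--         else:
--             if c == '\\' or c == '"':
--                 extras += 1
--             in_line = True
--             i += 1
--     if in_line:
--         total += 2
--     return total + extras
-- ===== Notes on version B (the rewrite author's own statement) =====
-- stated objective: alternative
-- what changed: Replaces the split-into-lines loop with its two per-line count scans by one explicit character-level state machine: a single index pass that adds 2 at each line break (CRLF counted as one, plus a trailing unterminated line) and tallies backslash and quote characters on the fly, never materialising the line list.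
import Mathlib
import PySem

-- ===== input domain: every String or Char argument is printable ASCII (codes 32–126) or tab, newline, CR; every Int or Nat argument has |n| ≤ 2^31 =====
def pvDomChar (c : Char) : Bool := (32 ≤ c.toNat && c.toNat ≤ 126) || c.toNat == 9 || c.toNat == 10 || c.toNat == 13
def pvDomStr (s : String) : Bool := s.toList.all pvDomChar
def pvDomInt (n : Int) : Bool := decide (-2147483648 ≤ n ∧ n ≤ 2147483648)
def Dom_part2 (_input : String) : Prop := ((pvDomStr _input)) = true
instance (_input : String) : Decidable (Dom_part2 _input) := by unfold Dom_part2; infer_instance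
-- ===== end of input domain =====

-- B replaces A's per-line loop (with its dead if/pass and per-line count scans) by a single
-- character-level state machine pass; within the domain '\n'/'\r' are the only line breaks.


-- ===== PORT A =====
def part2 (_input : String) : Int :=
  (PySem.Str.splitlines _input).foldl
    (fun s line =>
      -- the Python 'if not line or not line.startswith('"'): pass' has an empty body: no effect
      let k : Int := 2
      let k := k + (PySem.Str.count line "\\" : Int)
      let k := k + (PySem.Str.count line "\"" : Int)
      s + k)
    0

-- ===== PORT B =====
-- Source B's while loop over indices with a one-character lookahead for "\r\n",
-- transcribed as the obvious structural recursion on the character list.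
def p2go : List Char → Int → Int → Bool → Int
  | [], total, extras, inLine => (if inLine then total + 2 else total) + extras
  | '\n' :: rest, total, extras, _ => p2go rest (total + 2) extras false
  | '\r' :: '\n' :: rest, total, extras, _ => p2go rest (total + 2) extras false
  | '\r' :: rest, total, extras, _ => p2go rest (total + 2) extras false
  | c :: rest, total, extras, _ =>
      p2go rest total (if c = '\\' || c = '"' then extras + 1 else extras) true

def part2_alt (_input : String) : Int :=
  p2go _input.toList 0 0 false

-- ===== PRECONDITION & SPEC =====
def Spec_part2 (_input : String) (out : Int) : Prop := out = part2_alt _input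
instance (_input : String) (out : Int) : Decidable (Spec_part2 _input out) := by unfold Spec_part2; infer_instance

-- ===== CLAIM (what is proved, stated in full; the proofs are below) =====
def Claim_equal_part2 : Prop := ∀ (_input : String), Dom_part2 _input → Spec_part2 _input (part2 _input)

-- ===== LEMMAS AND PROOFS =====

-- line count of B's state machine, isolated from the totals
def p2L : Bool → List Char → Int
  | inLine, [] => if inLine then 1 else 0
  | _, '\n' :: rest => 1 + p2L false rest
  | _, '\r' :: '\n' :: rest => 1 + p2L false rest
  | _, '\r' :: rest => 1 + p2L false rest
  | _, _ :: rest => p2L true rest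

-- B's pass = 2 * (its line count) + the two character counts
theorem p2go_eq : ∀ (cs : List Char) (total extras : Int) (hl : Bool),
    p2go cs total extras hl
      = total + 2 * p2L hl cs + extras + (cs.count '\\' : Int) + (cs.count '"' : Int) := by
  intro cs total extras hl
  fun_induction p2go cs total extras hl with
  | case1 total extras hl => cases hl <;> simp [p2L]
  | case2 rest total extras hl ih => simp [p2L, ih]; ring
  | case3 rest total extras hl ih => simp [p2L, ih]; ring
  | case4 rest total extras hl hne ih =>
    match rest, hne, ih with
    | [], _, ih => simp [p2L, ih]
    | x :: r, hne, ih =>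
      have hx : x ≠ '\n' := by rintro rfl; exact hne r rfl
      simp [p2L, ih, List.count_cons]
      ring
  | case5 c rest total extras hl h1 h2 h3 ih =>
    have hn : c ≠ '\n' := h1
    have hr : c ≠ '\r' := h3
    rw [ih]
    by_cases hb : c = '\\'
    · subst hb; simp [p2L]; ring
    · by_cases hq : c = '"'
      · subst hq; simp [p2L]; ring
      · simp [p2L, hb, hq]

-- Dom characters that the splitlines break test accepts are exactly '\n' and '\r'
theorem dom_break (c : Char) (hD : pvDomChar c = true)
    (hB : (decide (c.toNat = 10) || decide (c.toNat = 13) || decide (c.toNat = 11) ||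
           decide (c.toNat = 12) || decide (c.toNat = 28) || decide (c.toNat = 29) ||
           decide (c.toNat = 30) || decide (c.toNat = 133) || decide (c.toNat = 8232) ||
           decide (c.toNat = 8233)) = true) :
    c = '\n' ∨ c = '\r' := by
  simp [pvDomChar] at hD
  simp only [Bool.or_eq_true, decide_eq_true_eq] at hB
  have hinj : Function.Injective Char.toNat := StrictMono.injective fun a b h => h
  have : c.toNat = 10 ∨ c.toNat = 13 := by omega
  rcases this with h | h
  · left; exact hinj (h.trans rfl)
  · right; exact hinj (h.trans rfl)

-- under Dom, the length of splitlines.go's result is the state machine's line count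
theorem splitlinesGo_length (isB : Char → Bool)
    (hiso : ∀ c, pvDomChar c = true → isB c = true → c = '\n' ∨ c = '\r')
    (hnl : isB '\n' = true) (hcr : isB '\r' = true) :
    ∀ (s cur : List Char) (accs : List (List Char)),
      (∀ c ∈ s, pvDomChar c = true) →
      ((PySem.Chars.splitlines.go isB s cur accs).length : Int)
        = accs.length + p2L (!cur.isEmpty) s := by
  intro s cur accs
  fun_induction PySem.Chars.splitlines.go isB s cur accs with
  | case1 cur accs h =>
    intro _
    simp_all [List.isEmpty_iff, p2L]
  | case2 cur accs h =>
    intro _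
    simp_all [List.isEmpty_iff, p2L]
  | case3 rest cur accs ih =>
    intro hD
    have hD' : ∀ x ∈ rest, pvDomChar x = true := fun x hx => hD x (by simp [hx])
    simp [ih hD', p2L]; ring
  | case4 ch rest cur accs hne hb ih =>
    intro hD
    have hDc : pvDomChar ch = true := hD ch (by simp)
    have hD' : ∀ x ∈ rest, pvDomChar x = true := fun x hx => hD x (by simp [hx])
    rcases hiso ch hDc hb with rfl | rfl
    · simp [ih hD', p2L]; ring
    · -- ch = '\r' but the '\r\n' pattern did not match: rest does not start with '\n'
      match rest, hne, ih, hD' with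
      | [], _, ih, hD' => simp [ih hD', p2L]
      | x :: r, hne, ih, hD' =>
        have hx : x ≠ '\n' := by rintro rfl; exact hne r rfl rfl
        simp [ih hD', p2L, hx]; ring
  | case5 ch rest cur accs hne hb ih =>
    intro hD
    have hD' : ∀ x ∈ rest, pvDomChar x = true := fun x hx => hD x (by simp [hx])
    have hn : ch ≠ '\n' := by rintro rfl; simp [hnl] at hb
    have hr : ch ≠ '\r' := by rintro rfl; simp [hcr] at hb
    rw [ih hD']
    simp [p2L]

-- ==== A-side lemmas (A's loop = 2*lines + global counts) ====

theorem countGo_singleton (c : Char) (s : List Char) :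
    ∀ (fuel : Nat) (acc : Nat), s.length ≤ fuel →
      PySem.Chars.count.go [c] fuel s acc = acc + s.count c := by
  induction s with
  | nil =>
    intro fuel acc _
    cases fuel <;> simp [PySem.Chars.count.go]
  | cons h t ih =>
    intro fuel acc hf
    cases fuel with
    | zero => simp at hf
    | succ f =>
      have hf' : t.length ≤ f := by simpa using hf
      by_cases hc : h = c
      · subst hc
        simp [PySem.Chars.count.go, List.isPrefixOf, ih f (acc + 1) hf']
        omega
      · have : ([c].isPrefixOf (h :: t)) = false := by
          simp [List.isPrefixOf]
          exact fun e => (hc e.symm).elim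
        simp [PySem.Chars.count.go, this, ih f acc hf', hc]

theorem count_singleton (c : Char) (s : List Char) :
    PySem.Chars.count s [c] = s.count c := by
  simp [PySem.Chars.count, countGo_singleton c s s.length 0 le_rfl]

theorem splitlinesGo_count (isB : Char → Bool) (c : Char)
    (hB : isB c = false) (hr : c ≠ '\r') (hn : c ≠ '\n') :
    ∀ (s cur : List Char) (accs : List (List Char)),
      ((PySem.Chars.splitlines.go isB s cur accs).map (List.count c)).sum
        = s.count c + cur.count c + (accs.map (List.count c)).sum := by
  intro s cur accs
  fun_induction PySem.Chars.splitlines.go isB s cur accs with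
  | case1 cur accs h =>
    simp_all [List.isEmpty_iff]
  | case2 cur accs h =>
    simp_all [List.count_reverse, List.isEmpty_iff]
    omega
  | case3 rest cur accs ih =>
    simp [ih, Ne.symm hr, Ne.symm hn, List.count_reverse]
    omega
  | case4 ch rest cur accs hne hb ih =>
    have hcc : ch ≠ c := fun e => by subst e; simp_all
    simp [ih, hcc, List.count_reverse]
    omega
  | case5 ch rest cur accs hne hb ih =>
    simp [ih, List.count_cons]
    omega

theorem splitlines_count (c : Char)
    (hB : (decide (c.toNat = 10) || decide (c.toNat = 13) || decide (c.toNat = 11) ||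
           decide (c.toNat = 12) || decide (c.toNat = 28) || decide (c.toNat = 29) ||
           decide (c.toNat = 30) || decide (c.toNat = 133) || decide (c.toNat = 8232) ||
           decide (c.toNat = 8233)) = false)
    (hr : c ≠ '\r') (hn : c ≠ '\n') (s : List Char) :
    ((PySem.Chars.splitlines s).map (List.count c)).sum = s.count c := by
  have h := splitlinesGo_count
    (fun ch => decide (ch.toNat = 10) || decide (ch.toNat = 13) || decide (ch.toNat = 11) ||
      decide (ch.toNat = 12) || decide (ch.toNat = 28) || decide (ch.toNat = 29) ||
      decide (ch.toNat = 30) || decide (ch.toNat = 133) || decide (ch.toNat = 8232) ||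
      decide (ch.toNat = 8233)) c (by simpa using hB) hr hn s [] []
  simpa [PySem.Chars.splitlines] using h

theorem foldl_plus (f : String → Int) (l : List String) : ∀ (a : Int),
    l.foldl (fun s x => s + f x) a = a + (l.map f).sum := by
  induction l with
  | nil => simp
  | cons h t ih => intro a; simp [ih]; ring

theorem map_sum_two (g h : String → Int) (l : List String) :
    (l.map (fun x => 2 + g x + h x)).sum = 2 * l.length + (l.map g).sum + (l.map h).sum := by
  induction l with
  | nil => simp
  | cons x t ih => simp [ih]; ring

theorem sum_map_intCast (g : List Char → Nat) (l : List (List Char)) :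
    (l.map (fun x => (g x : Int))).sum = ((l.map g).sum : Int) := by
  induction l <;> simp_all

theorem lines_count (c : Char)
    (hB : (decide (c.toNat = 10) || decide (c.toNat = 13) || decide (c.toNat = 11) ||
           decide (c.toNat = 12) || decide (c.toNat = 28) || decide (c.toNat = 29) ||
           decide (c.toNat = 30) || decide (c.toNat = 133) || decide (c.toNat = 8232) ||
           decide (c.toNat = 8233)) = false)
    (hr : c ≠ '\r') (hn : c ≠ '\n') (s : String) :
    ((PySem.Str.splitlines s).map (fun line => (PySem.Chars.count line.toList [c] : Int))).sum
      = (PySem.Chars.count s.toList [c] : Int) := by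
  have h1 : (PySem.Str.splitlines s).map (fun line => (PySem.Chars.count line.toList [c] : Int))
      = ((PySem.Str.splitlines s).map String.toList).map (fun cs => ((cs.count c : Nat) : Int)) := by
    rw [List.map_map]
    simp [Function.comp, count_singleton]
  rw [h1, PySem.Str.splitlines_map_toList, sum_map_intCast, splitlines_count c hB hr hn,
    count_singleton]

-- ===== VERDICT (by name: the statement is the Claim_ definition above) =====
theorem part2_spec : Claim_equal_part2 := by
  unfold Claim_equal_part2 Spec_part2
  intro s hDom
  have hD : ∀ c ∈ s.toList, pvDomChar c = true := by
    simpa [Dom_part2, pvDomStr, List.all_eq_true] using hDom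
  -- A's side: 2 * number of lines + global counts
  have hA : part2 s = 2 * ((PySem.Str.splitlines s).length : Int)
      + (PySem.Chars.count s.toList ['\\'] : Int) + (PySem.Chars.count s.toList ['"'] : Int) := by
    unfold part2
    simp only [PySem.Str.count_eq]
    have hbs : ("\\".toList) = ['\\'] := rfl
    have hq : ("\"".toList) = ['"'] := rfl
    rw [hbs, hq, foldl_plus (fun line => 2 + (PySem.Chars.count line.toList ['\\'] : Int)
        + (PySem.Chars.count line.toList ['"'] : Int)),
      map_sum_two (fun line => (PySem.Chars.count line.toList ['\\'] : Int))
        (fun line => (PySem.Chars.count line.toList ['"'] : Int)),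
      lines_count '\\' (by decide) (by decide) (by decide),
      lines_count '"' (by decide) (by decide) (by decide)]
    ring
  -- B's side: the state machine computes the same three quantities in one pass
  have hLen : (PySem.Str.splitlines s).length = (PySem.Chars.splitlines s.toList).length := by
    rw [← PySem.Str.splitlines_map_toList, List.length_map]
  have hGo := splitlinesGo_length
    (fun ch => decide (ch.toNat = 10) || decide (ch.toNat = 13) || decide (ch.toNat = 11) ||
      decide (ch.toNat = 12) || decide (ch.toNat = 28) || decide (ch.toNat = 29) ||
      decide (ch.toNat = 30) || decide (ch.toNat = 133) || decide (ch.toNat = 8232) ||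
      decide (ch.toNat = 8233))
    (fun c hc hb => dom_break c hc (by simpa using hb)) (by decide) (by decide)
    s.toList [] [] hD
  rw [hA, part2_alt, p2go_eq, count_singleton, count_singleton, hLen]
  have hlines : ((PySem.Chars.splitlines s.toList).length : Int) = p2L false s.toList := by
    simpa [PySem.Chars.splitlines] using hGo
  rw [hlines]
  ring
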